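-- pv_equiv track=rewrite | github.com/ketang/bento | catalog/skills/generate-audit/scripts/audit-discover.py | interface_surfaces
-- ===== SOURCE A (Python) =====
-- def unique_sorted(values: list[str]) -> list[str]:
--     return sorted({value for value in values if value})
--
-- def interface_surfaces(files: list[str]) -> dict[str, list[str]]:
--     api_schema_files = []
--     generated_code_paths = []
--     config_contract_files = []
--     cli_entrypoints = []
--
--     for path in files:
--         lowered = path.lower()
--         if lowered.endswith((".graphql", ".gql", ".proto")) or "openapi" in lowered or "asyncapi" in lowered:
--             api_schema_files.append(path)
--         if "/generated/" in f"/{lowered}" or "/__generated__/" in f"/{lowered}" or ".gen." in lowered: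
--             generated_code_paths.append(path)
--         if lowered.startswith(".env") or lowered.endswith(".env.example") or lowered.endswith(".env.sample"):
--             config_contract_files.append(path)
--         if lowered.endswith(("config.example.json", "config.example.yaml", "config.example.yml")):
--             config_contract_files.append(path)
--         if lowered.startswith("cmd/") or lowered.startswith("bin/") or lowered.startswith("scripts/"):
--             cli_entrypoints.append(path)
--
--     return {
--         "api_schema_files": unique_sorted(api_schema_files),
--         "generated_code_paths": unique_sorted(generated_code_paths),
--         "config_contract_files": unique_sorted(config_contract_files),
--         "cli_entrypoints": unique_sorted(cli_entrypoints),
--     }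
-- ===== SOURCE B (Python) =====
-- def unique_sorted(values: list[str]) -> list[str]:
--     return sorted({value for value in values if value})
--
-- def _is_api_schema(path: str) -> bool:
--     lowered = path.lower()
--     return lowered.endswith((".graphql", ".gql", ".proto")) or "openapi" in lowered or "asyncapi" in lowered
--
-- def _is_generated(path: str) -> bool:
--     lowered = path.lower()
--     return "/generated/" in f"/{lowered}" or "/__generated__/" in f"/{lowered}" or ".gen." in lowered
--
-- def _is_config_contract(path: str) -> bool:
--     lowered = path.lower()
--     return (lowered.startswith(".env") or lowered.endswith(".env.example") or lowered.endswith(".env.sample")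
--             or lowered.endswith(("config.example.json", "config.example.yaml", "config.example.yml")))
--
-- def _is_cli(path: str) -> bool:
--     lowered = path.lower()
--     return lowered.startswith(("cmd/", "bin/", "scripts/"))
--
-- def interface_surfaces(files: list[str]) -> dict[str, list[str]]:
--     buckets = {
--         "api_schema_files": _is_api_schema,
--         "generated_code_paths": _is_generated,
--         "config_contract_files": _is_config_contract,
--         "cli_entrypoints": _is_cli,
--     }
--     return {name: unique_sorted([p for p in files if pred(p)]) for name, pred in buckets.items()}
-- ===== Notes on version B (the rewrite author's own statement) =====
-- stated objective: idiomatic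
-- what changed: The single accumulating loop with five append branches is decomposed into four named path predicates and four independent filter-and-unique_sorted bucket constructions (the two config append conditions merged into one OR predicate), built via a dict comprehension.
import Mathlib
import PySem

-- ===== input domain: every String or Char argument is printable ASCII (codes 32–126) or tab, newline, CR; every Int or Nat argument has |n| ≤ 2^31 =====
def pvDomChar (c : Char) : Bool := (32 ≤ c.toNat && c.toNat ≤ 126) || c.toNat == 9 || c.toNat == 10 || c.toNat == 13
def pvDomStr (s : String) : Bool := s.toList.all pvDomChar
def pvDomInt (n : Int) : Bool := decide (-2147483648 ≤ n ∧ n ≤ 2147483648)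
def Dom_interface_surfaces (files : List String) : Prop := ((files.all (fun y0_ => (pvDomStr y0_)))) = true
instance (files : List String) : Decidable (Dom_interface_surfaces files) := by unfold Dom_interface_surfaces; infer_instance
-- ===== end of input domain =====

-- B decomposes A's single five-branch accumulating loop into four independent predicate-filter bucket passes (idiomatic; same cost).

-- B decomposes A's single five-branch accumulating loop into four independent predicate-filter bucket passes (idiomatic; same cost).

-- ===== PORT A =====
def unique_sorted (values : List String) : List String :=
  PySem.List.sorted (PySem.Set.ofList (values.filter (fun v => !(v == "")))) (fun x => x) false

-- the body of A's for-loop, acting on the four accumulator lists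
def stepA (acc : List String × List String × List String × List String) (path : String) :
    List String × List String × List String × List String :=
  let api := acc.1
  let gen := acc.2.1
  let cfg := acc.2.2.1
  let cli := acc.2.2.2
  let lowered := PySem.Str.lower path
  let api := if PySem.Str.endswith lowered ".graphql" || PySem.Str.endswith lowered ".gql" || PySem.Str.endswith lowered ".proto" || PySem.Str.isIn "openapi" lowered || PySem.Str.isIn "asyncapi" lowered then api ++ [path] else api
  let gen := if PySem.Str.isIn "/generated/" ("/" ++ lowered) || PySem.Str.isIn "/__generated__/" ("/" ++ lowered) || PySem.Str.isIn ".gen." lowered then gen ++ [path] else gen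
  let cfg := if PySem.Str.startswith lowered ".env" || PySem.Str.endswith lowered ".env.example" || PySem.Str.endswith lowered ".env.sample" then cfg ++ [path] else cfg
  let cfg := if PySem.Str.endswith lowered "config.example.json" || PySem.Str.endswith lowered "config.example.yaml" || PySem.Str.endswith lowered "config.example.yml" then cfg ++ [path] else cfg
  let cli := if PySem.Str.startswith lowered "cmd/" || PySem.Str.startswith lowered "bin/" || PySem.Str.startswith lowered "scripts/" then cli ++ [path] else cli
  (api, gen, cfg, cli)

def interface_surfaces (files : List String) : List (String × List String) :=
  let st := files.foldl stepA ([], [], [], [])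
  [("api_schema_files", unique_sorted st.1),
   ("generated_code_paths", unique_sorted st.2.1),
   ("config_contract_files", unique_sorted st.2.2.1),
   ("cli_entrypoints", unique_sorted st.2.2.2)]

-- ===== PORT B =====
def is_api_schema (path : String) : Bool :=
  let lowered := PySem.Str.lower path
  PySem.Str.endswith lowered ".graphql" || PySem.Str.endswith lowered ".gql" || PySem.Str.endswith lowered ".proto" || PySem.Str.isIn "openapi" lowered || PySem.Str.isIn "asyncapi" lowered

def is_generated (path : String) : Bool :=
  let lowered := PySem.Str.lower path
  PySem.Str.isIn "/generated/" ("/" ++ lowered) || PySem.Str.isIn "/__generated__/" ("/" ++ lowered) || PySem.Str.isIn ".gen." lowered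

def is_config_contract (path : String) : Bool :=
  let lowered := PySem.Str.lower path
  PySem.Str.startswith lowered ".env" || PySem.Str.endswith lowered ".env.example" || PySem.Str.endswith lowered ".env.sample"
    || (PySem.Str.endswith lowered "config.example.json" || PySem.Str.endswith lowered "config.example.yaml" || PySem.Str.endswith lowered "config.example.yml")

def is_cli (path : String) : Bool :=
  let lowered := PySem.Str.lower path
  PySem.Str.startswith lowered "cmd/" || PySem.Str.startswith lowered "bin/" || PySem.Str.startswith lowered "scripts/"

def interface_surfaces_alt (files : List String) : List (String × List String) :=
  [("api_schema_files", unique_sorted (files.filter is_api_schema)),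
   ("generated_code_paths", unique_sorted (files.filter is_generated)),
   ("config_contract_files", unique_sorted (files.filter is_config_contract)),
   ("cli_entrypoints", unique_sorted (files.filter is_cli))]

-- ===== PRECONDITION & SPEC =====
def Spec_interface_surfaces (files : List String) (out : List (String × List String)) : Prop := out = interface_surfaces_alt files
instance (files : List String) (out : List (String × List String)) : Decidable (Spec_interface_surfaces files out) := by unfold Spec_interface_surfaces; infer_instance

-- ===== CLAIM (what is proved, stated in full; the proofs are below) =====
def Claim_equal_interface_surfaces : Prop := ∀ (files : List String), Dom_interface_surfaces files → Spec_interface_surfaces files (interface_surfaces files)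

-- ===== LEMMAS AND PROOFS =====
-- the per-path contribution of A's two config-bucket appends
def cfgPiece (path : String) : List String :=
  (if PySem.Str.startswith (PySem.Str.lower path) ".env" || PySem.Str.endswith (PySem.Str.lower path) ".env.example" || PySem.Str.endswith (PySem.Str.lower path) ".env.sample" then [path] else [])
  ++ (if PySem.Str.endswith (PySem.Str.lower path) "config.example.json" || PySem.Str.endswith (PySem.Str.lower path) "config.example.yaml" || PySem.Str.endswith (PySem.Str.lower path) "config.example.yml" then [path] else [])

theorem stepA_eq (acc : List String × List String × List String × List String) (path : String) :
    stepA acc path =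
      ((if is_api_schema path then acc.1 ++ [path] else acc.1),
       (if is_generated path then acc.2.1 ++ [path] else acc.2.1),
       acc.2.2.1 ++ cfgPiece path,
       (if is_cli path then acc.2.2.2 ++ [path] else acc.2.2.2)) := by
  unfold stepA is_api_schema is_generated is_cli cfgPiece
  split_ifs <;> simp_all

-- A's fold, characterised bucket by bucket
theorem foldA_eq (files : List String) (a g c l : List String) :
    files.foldl stepA (a, g, c, l)
    = (a ++ files.filter is_api_schema, g ++ files.filter is_generated,
       c ++ files.flatMap cfgPiece, l ++ files.filter is_cli) := by
  induction files generalizing a g c l with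
  | nil => simp
  | cons p t ih =>
    rw [List.foldl_cons, stepA_eq, ih]
    simp only [List.filter_cons, List.flatMap_cons]
    split_ifs <;> simp

theorem mem_cfgPiece (x path : String) :
    x ∈ cfgPiece path ↔ x = path ∧ is_config_contract path = true := by
  unfold cfgPiece is_config_contract
  simp only [List.mem_append]
  split_ifs with h1 h2 h2 <;> simp_all

theorem unique_sorted_eq_of_mem_iff (xs ys : List String) (h : ∀ x, x ∈ xs ↔ x ∈ ys) :
    unique_sorted xs = unique_sorted ys := by
  unfold unique_sorted
  refine PySem.List.sorted_eq_sorted_of_perm _ _ _ (fun x y hxy => hxy) ?_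
  rw [List.perm_ext_iff_of_nodup (PySem.Set.nodup_ofList _) (PySem.Set.nodup_ofList _)]
  intro x
  simp only [PySem.Set.mem_ofList, List.mem_filter, h x]

theorem cfg_mem (files : List String) (x : String) :
    x ∈ files.flatMap cfgPiece ↔ x ∈ files.filter is_config_contract := by
  simp only [List.mem_flatMap, List.mem_filter, mem_cfgPiece]
  constructor
  · rintro ⟨p, hp, rfl, hc⟩; exact ⟨hp, hc⟩
  · rintro ⟨hx, hc⟩; exact ⟨x, hx, rfl, hc⟩

-- ===== VERDICT (by name: the statement is the Claim_ definition above) =====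
theorem interface_surfaces_spec : Claim_equal_interface_surfaces := by
  intro files _
  unfold Spec_interface_surfaces interface_surfaces interface_surfaces_alt
  rw [foldA_eq]
  simp only [List.nil_append]
  rw [unique_sorted_eq_of_mem_iff (files.flatMap cfgPiece) (files.filter is_config_contract) (cfg_mem files)]
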